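-- pv_equiv track=rewrite | github.com/banana-galaxy/challenges | challenge8(theater_escape)/willie.py | whichExit
-- ===== SOURCE A (Python) =====
-- def whichExit(matrix):
--     for row in matrix:
--         if 0 not in row:
--             continue
--
--         i = row.index(0)
--         l_sum = row[:i].count(1)
--         r_sum = row[i + 1:].count(1)
--
--         if l_sum == r_sum:
--             return "same"
--         elif l_sum < r_sum:
--             return "left"
--         else:
--             return "right"
-- ===== SOURCE B (Python) =====
-- def whichExit(matrix):
--     for row in matrix:
--         # prefix-sum table: prefix[k] = number of 1s among the first k cells
--         prefix = [0]
--         for x in row: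
--             prefix.append(prefix[-1] + (1 if x == 1 else 0))
--         for i, x in enumerate(row):
--             if x == 0:
--                 l = prefix[i]
--                 r = prefix[-1] - prefix[i + 1]
--                 if l == r:
--                     return "same"
--                 return "left" if l < r else "right"
-- ===== Notes on version B (the rewrite author's own statement) =====
-- stated objective: alternative
-- what changed: Instead of locating the first 0 with index() and counting 1s in two slices, B precomputes a prefix-sum table of 1s per row and, at the first 0 it meets, reads the left count from the table and derives the right count by subtraction from the total.
import Mathlib
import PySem

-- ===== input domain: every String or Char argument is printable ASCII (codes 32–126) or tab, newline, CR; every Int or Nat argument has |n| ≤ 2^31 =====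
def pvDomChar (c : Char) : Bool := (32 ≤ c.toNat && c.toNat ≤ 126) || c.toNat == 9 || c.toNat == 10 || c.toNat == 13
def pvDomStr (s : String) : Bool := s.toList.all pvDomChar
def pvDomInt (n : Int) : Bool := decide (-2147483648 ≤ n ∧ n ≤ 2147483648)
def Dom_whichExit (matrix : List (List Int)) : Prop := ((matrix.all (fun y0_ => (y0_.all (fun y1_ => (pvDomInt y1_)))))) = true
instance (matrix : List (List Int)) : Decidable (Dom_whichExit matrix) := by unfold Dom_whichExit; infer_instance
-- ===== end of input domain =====

-- B replaces A's index()-then-two-slice-counts with a per-row prefix-sum table of 1s: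
-- the left count is read from the table at the first 0 and the right count is the
-- total minus the table entry just past it; same results (objective: alternative).

-- ===== PORT A =====
def whichExit (matrix : List (List Int)) : Option String :=
  match matrix with
  | [] => none
  | row :: rest =>
    match PySem.List.index? row 0 with
    | none => whichExit rest          -- '0 not in row: continue'
    | some i =>
      let lsum := PySem.List.count (PySem.List.slice row none (some (i : Int))) 1
      let rsum := PySem.List.count (PySem.List.slice row (some ((i : Int) + 1)) none) 1
      if lsum = rsum then some "same"
      else if lsum < rsum then some "left"
      else some "right"

-- ===== PORT B =====
-- Source B's table-building loop 'prefix.append(prefix[-1] + …)' is the standard scanl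
def pvStepPfx (s x : Int) : Int := s + (if x = 1 then 1 else 0)

-- Source B's second loop: 'for i, x in enumerate(row): if x == 0: …'
-- (prefix[i] / prefix[i+1] are in range whenever reached, so getD's default is never used;
--  prefix[-1] is the last entry of the nonempty table)
def pvFindZero (pfx : List Int) : List Int → Nat → Option String
  | [], _ => none
  | x :: xs, i =>
    if x = 0 then
      let l := pfx.getD i 0
      let r := (pfx.getLast?.getD 0) - pfx.getD (i + 1) 0
      some (if l = r then "same" else if l < r then "left" else "right")
    else pvFindZero pfx xs (i + 1)

def whichExit_alt (matrix : List (List Int)) : Option String :=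
  match matrix with
  | [] => none
  | row :: rest =>
    match pvFindZero (List.scanl pvStepPfx 0 row) row 0 with
    | some res => some res
    | none => whichExit_alt rest

-- ===== PRECONDITION & SPEC =====
def Spec_whichExit (matrix : List (List Int)) (out : Option String) : Prop := out = whichExit_alt matrix
instance (matrix : List (List Int)) (out : Option String) : Decidable (Spec_whichExit matrix out) := by unfold Spec_whichExit; infer_instance

-- ===== CLAIM (what is proved, stated in full; the proofs are below) =====
def Claim_equal_whichExit : Prop := ∀ (matrix : List (List Int)), Dom_whichExit matrix → Spec_whichExit matrix (whichExit matrix)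

-- ===== LEMMAS AND PROOFS =====

-- the prefix table at position k holds the count of 1s among the first k cells
lemma scanl_getD (l : List Int) : ∀ (b : Int) (k : Nat), k ≤ l.length →
    (List.scanl pvStepPfx b l).getD k 0 = b + ((l.take k).count 1 : Int) := by
  induction l with
  | nil =>
    intro b k hk
    have hk0 : k = 0 := Nat.le_zero.mp hk
    subst hk0; simp
  | cons x xs ih =>
    intro b k hk
    cases k with
    | zero => simp
    | succ k =>
      rw [List.scanl_cons, List.getD_cons_succ, ih (pvStepPfx b x) k (by simpa using hk),
        List.take_succ_cons, List.count_cons]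
      by_cases h1 : x = 1 <;> simp [pvStepPfx, h1] <;> omega

-- the last entry of the prefix table is the count of 1s in the whole row
lemma scanl_last (l : List Int) : ∀ (b : Int),
    (List.scanl pvStepPfx b l).getLast?.getD 0 = b + (l.count 1 : Int) := by
  induction l with
  | nil => intro b; simp
  | cons x xs ih =>
    intro b
    rw [List.scanl_cons]
    have h := ih (pvStepPfx b x)
    rcases hsc : List.scanl pvStepPfx (pvStepPfx b x) xs with _ | ⟨y, ys⟩
    · exact absurd hsc (by cases xs <;> simp [List.scanl])
    · rw [hsc] at h
      rw [List.getLast?_cons_cons, h, List.count_cons]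
      by_cases h1 : x = 1 <;> simp [pvStepPfx, h1] <;> omega

-- if a row has no 0, the scan returns none
lemma pvFindZero_none (pfx : List Int) (xs : List Int) (h : (0 : Int) ∉ xs) :
    ∀ i, pvFindZero pfx xs i = none := by
  induction xs with
  | nil => intro i; rfl
  | cons x xs ih =>
    intro i
    have hx : x ≠ 0 := by intro e; exact h (e ▸ List.mem_cons_self)
    have hxs : (0 : Int) ∉ xs := fun m => h (List.mem_cons_of_mem _ m)
    simp [pvFindZero, hx, ih hxs]

-- the scan reaches the first 0 (at absolute index i + pre.length)
lemma pvFindZero_split (pfx : List Int) (pre suf : List Int) (h : (0 : Int) ∉ pre) :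
    ∀ i, pvFindZero pfx (pre ++ 0 :: suf) i =
      some (let l := pfx.getD (i + pre.length) 0
            let r := (pfx.getLast?.getD 0) - pfx.getD (i + pre.length + 1) 0
            if l = r then "same" else if l < r then "left" else "right") := by
  induction pre with
  | nil => intro i; simp [pvFindZero]
  | cons x xs ih =>
    intro i
    have hx : x ≠ 0 := by intro e; exact h (e ▸ List.mem_cons_self)
    have hxs : (0 : Int) ∉ xs := fun m => h (List.mem_cons_of_mem _ m)
    simp only [List.cons_append, pvFindZero, if_neg hx, ih hxs]
    have : i + 1 + xs.length = i + (x :: xs).length := by simp; omega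
    simp [this]

theorem whichExit_spec : Claim_equal_whichExit := by
  unfold Claim_equal_whichExit
  intro matrix _
  unfold Spec_whichExit
  clear ‹Dom_whichExit matrix›
  induction matrix with
  | nil => rfl
  | cons row rest ih =>
    unfold whichExit whichExit_alt
    cases hidx : PySem.List.index? row 0 with
    | none =>
      have hnot : (0 : Int) ∉ row := (PySem.List.index?_eq_none_iff row 0).1 hidx
      rw [pvFindZero_none _ row hnot 0]
      simpa using ih
    | some i =>
      obtain ⟨pre, suf, hrow, hlen, hpre⟩ := (PySem.List.index?_eq_some_iff row 0 i).1 hidx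
      subst hrow
      rw [pvFindZero_split _ pre suf hpre 0]
      have hsl : PySem.List.slice (pre ++ 0 :: suf) none (some (i : Int)) = pre := by
        rw [PySem.List.slice_to_natCast]
        simp [List.take_left' hlen]
      have hsr : PySem.List.slice (pre ++ 0 :: suf) (some ((i : Int) + 1)) none = suf := by
        have : ((i : Int) + 1) = ((i + 1 : Nat) : Int) := by push_cast; ring
        rw [this, PySem.List.slice_from_natCast]
        subst hlen; simp
      -- B's table reads
      have hlenrow : pre.length ≤ (pre ++ 0 :: suf).length := by simp
      have hl : (List.scanl pvStepPfx 0 (pre ++ 0 :: suf)).getD (0 + pre.length) 0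
          = (pre.count 1 : Int) := by
        rw [Nat.zero_add, scanl_getD _ 0 pre.length hlenrow]
        simp [List.take_left' rfl]
      have hl1 : (List.scanl pvStepPfx 0 (pre ++ 0 :: suf)).getD (0 + pre.length + 1) 0
          = (pre.count 1 : Int) := by
        rw [Nat.zero_add, scanl_getD _ 0 (pre.length + 1) (by simp)]
        have : (pre ++ 0 :: suf).take (pre.length + 1) = pre ++ [0] := by
          rw [List.take_append]; simp
        simp [this, List.count_append]
      have hlast : (List.scanl pvStepPfx 0 (pre ++ 0 :: suf)).getLast?.getD 0
          = (pre.count 1 : Int) + (suf.count 1 : Int) := by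
        rw [scanl_last]
        simp [List.count_append]
      simp only [hl, hl1, hlast, hsl, hsr, PySem.List.count_eq]
      have hrs : (pre.count 1 : Int) + (suf.count 1 : Int) - (pre.count 1 : Int)
          = (suf.count 1 : Int) := by ring
      rw [hrs]
      rcases lt_trichotomy ((pre.count 1 : Int)) ((suf.count 1 : Int)) with h | h | h
      · have hn : pre.count 1 < suf.count 1 := by exact_mod_cast h
        simp [h, ne_of_lt h, hn, Nat.ne_of_lt hn]
      · have hn : pre.count 1 = suf.count 1 := by exact_mod_cast h
        simp [hn]
      · have hn : suf.count 1 < pre.count 1 := by exact_mod_cast h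
        simp [ne_of_gt h, not_lt_of_gt h, Nat.ne_of_gt hn, not_lt_of_gt hn]
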